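-- pv_equiv track=rewrite | github.com/mr-tan4/Orcas | governance/risk_rating.py | heuristic_scoring
-- ===== SOURCE A (Python) =====
-- def heuristic_scoring(text: str) -> dict:
--     """Heuristic scoring from decision text."""
--     scores = {"A": 1, "B": 1, "C": 1}
--
--     # Reversibility boost
--     if any(kw in text for kw in
--            ["replace", "migrate", "rewrite", "redo", "substitute", "swap"]):
--         scores["A"] = 3
--     elif any(kw in text for kw in
--              ["modify", "update", "upgrade", "refactor", "migration"]):
--         scores["A"] = 2
--
--     # Impact boost
--     if any(kw in text for kw in
--            ["architecture", "core", "entire", "all", "system", "platform", "framework"]):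
--         scores["B"] = 3
--     elif any(kw in text for kw in
--              ["module", "component", "service", "interface", "feature", "flow"]):
--         scores["B"] = 2
--
--     # Novelty boost
--     if any(kw in text for kw in
--            ["replace", "migrate", "refactor", "architecture", "switch", "upgrade", "rewrite"]):
--         scores["C"] = 3
--     elif any(kw in text for kw in ["new", "explore", "trial", "introduce", "integrate"]):
--         scores["C"] = 2
--
--     for k in scores:
--         scores[k] = min(scores[k], 3)
--     return scores
-- ===== SOURCE B (Python) =====
-- # B: inverted index — one flat pass over a keyword -> [(key, score)] effects map,
-- # keeping the max score seen per key (max-aggregation replaces A's six tiered if/elif blocks).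
--
-- KEYWORD_EFFECTS = [
--     ("replace", [("A", 3), ("C", 3)]),
--     ("migrate", [("A", 3), ("C", 3)]),
--     ("rewrite", [("A", 3), ("C", 3)]),
--     ("redo", [("A", 3)]),
--     ("substitute", [("A", 3)]),
--     ("swap", [("A", 3)]),
--     ("modify", [("A", 2)]),
--     ("update", [("A", 2)]),
--     ("upgrade", [("A", 2), ("C", 3)]),
--     ("refactor", [("A", 2), ("C", 3)]),
--     ("migration", [("A", 2)]),
--     ("architecture", [("B", 3), ("C", 3)]),
--     ("core", [("B", 3)]),
--     ("entire", [("B", 3)]),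
--     ("all", [("B", 3)]),
--     ("system", [("B", 3)]),
--     ("platform", [("B", 3)]),
--     ("framework", [("B", 3)]),
--     ("module", [("B", 2)]),
--     ("component", [("B", 2)]),
--     ("service", [("B", 2)]),
--     ("interface", [("B", 2)]),
--     ("feature", [("B", 2)]),
--     ("flow", [("B", 2)]),
--     ("switch", [("C", 3)]),
--     ("new", [("C", 2)]),
--     ("explore", [("C", 2)]),
--     ("trial", [("C", 2)]),
--     ("introduce", [("C", 2)]),
--     ("integrate", [("C", 2)]),
-- ]
--
--
-- def heuristic_scoring(text: str) -> dict:
--     scores = {"A": 1, "B": 1, "C": 1}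
--     for kw, effects in KEYWORD_EFFECTS:
--         if kw in text:
--             for key, s in effects:
--                 if s > scores[key]:
--                     scores[key] = s
--     return scores
-- ===== Notes on version B (the rewrite author's own statement) =====
-- stated objective: alternative
-- what changed: Replaced A's six per-category tiered if/elif any() blocks by a single inverted pass over a keyword -> (category, score) effects map that keeps the max score seen per category.
import Mathlib
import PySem

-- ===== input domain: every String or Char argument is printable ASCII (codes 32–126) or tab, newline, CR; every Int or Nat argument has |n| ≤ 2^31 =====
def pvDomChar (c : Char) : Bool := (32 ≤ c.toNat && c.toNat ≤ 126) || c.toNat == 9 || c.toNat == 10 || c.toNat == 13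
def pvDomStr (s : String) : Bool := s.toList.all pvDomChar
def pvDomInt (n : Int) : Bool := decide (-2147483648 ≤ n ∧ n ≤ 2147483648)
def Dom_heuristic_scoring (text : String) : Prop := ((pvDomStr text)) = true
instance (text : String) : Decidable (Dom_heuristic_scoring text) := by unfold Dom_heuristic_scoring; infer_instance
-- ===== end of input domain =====

-- B replaces A's six tiered if/elif keyword blocks by one flat pass over a keyword -> (key, score)
-- effects map, keeping the max score per key (alternative decomposition, same cost).

-- ===== PORT A =====
-- any(kw in text for kw in kws)
def pvAnyKw (kws : List String) (text : String) : Bool :=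
  kws.any (fun kw => PySem.Str.isIn kw text)

def heuristic_scoring (text : String) : List (String × Int) :=
  let scores : PySem.Dict String Int := PySem.Dict.ofList [("A", 1), ("B", 1), ("C", 1)]
  -- Reversibility boost
  let scores :=
    if pvAnyKw ["replace", "migrate", "rewrite", "redo", "substitute", "swap"] text then
      scores.insert "A" 3
    else if pvAnyKw ["modify", "update", "upgrade", "refactor", "migration"] text then
      scores.insert "A" 2
    else scores
  -- Impact boost
  let scores :=
    if pvAnyKw ["architecture", "core", "entire", "all", "system", "platform", "framework"] text then
      scores.insert "B" 3
    else if pvAnyKw ["module", "component", "service", "interface", "feature", "flow"] text then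
      scores.insert "B" 2
    else scores
  -- Novelty boost
  let scores :=
    if pvAnyKw ["replace", "migrate", "refactor", "architecture", "switch", "upgrade", "rewrite"] text then
      scores.insert "C" 3
    else if pvAnyKw ["new", "explore", "trial", "introduce", "integrate"] text then
      scores.insert "C" 2
    else scores
  -- for k in scores: scores[k] = min(scores[k], 3)
  let scores := scores.keys.foldl (fun d k => d.insert k (min (d.getD k 0) 3)) scores
  scores.items

-- ===== PORT B =====
def pvEffects : List (String × List (String × Int)) :=
  [("replace", [("A", 3), ("C", 3)]),
   ("migrate", [("A", 3), ("C", 3)]),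
   ("rewrite", [("A", 3), ("C", 3)]),
   ("redo", [("A", 3)]),
   ("substitute", [("A", 3)]),
   ("swap", [("A", 3)]),
   ("modify", [("A", 2)]),
   ("update", [("A", 2)]),
   ("upgrade", [("A", 2), ("C", 3)]),
   ("refactor", [("A", 2), ("C", 3)]),
   ("migration", [("A", 2)]),
   ("architecture", [("B", 3), ("C", 3)]),
   ("core", [("B", 3)]),
   ("entire", [("B", 3)]),
   ("all", [("B", 3)]),
   ("system", [("B", 3)]),
   ("platform", [("B", 3)]),
   ("framework", [("B", 3)]),
   ("module", [("B", 2)]),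
   ("component", [("B", 2)]),
   ("service", [("B", 2)]),
   ("interface", [("B", 2)]),
   ("feature", [("B", 2)]),
   ("flow", [("B", 2)]),
   ("switch", [("C", 3)]),
   ("new", [("C", 2)]),
   ("explore", [("C", 2)]),
   ("trial", [("C", 2)]),
   ("introduce", [("C", 2)]),
   ("integrate", [("C", 2)])]

-- inner loop: 'if s > scores[key]: scores[key] = s' (key is always present in scores,
-- so getD 0 is exact here — Python's scores[key] never misses)
def pvBumpOne (d : PySem.Dict String Int) (e : String × Int) : PySem.Dict String Int :=
  if e.2 > d.getD e.1 0 then d.insert e.1 e.2 else d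

-- outer loop body: 'if kw in text: for key, s in effects: …'
def pvBumpKw (text : String) (d : PySem.Dict String Int)
    (r : String × List (String × Int)) : PySem.Dict String Int :=
  if PySem.Str.isIn r.1 text then r.2.foldl pvBumpOne d else d

def heuristic_scoring_alt (text : String) : List (String × Int) :=
  (pvEffects.foldl (pvBumpKw text) (PySem.Dict.ofList [("A", 1), ("B", 1), ("C", 1)])).items

-- ===== PRECONDITION & SPEC =====
def Spec_heuristic_scoring (text : String) (out : List (String × Int)) : Prop := out = heuristic_scoring_alt text
instance (text : String) (out : List (String × Int)) : Decidable (Spec_heuristic_scoring text out) := by unfold Spec_heuristic_scoring; infer_instance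

-- ===== CLAIM (what is proved, stated in full; the proofs are below) =====
def Claim_equal_heuristic_scoring : Prop := ∀ (text : String), Dom_heuristic_scoring text → Spec_heuristic_scoring text (heuristic_scoring text)

-- ===== LEMMAS AND PROOFS =====

-- the three-key dict every reachable state of B's loop has
def pvMkD (va vb vc : Int) : PySem.Dict String Int :=
  PySem.Dict.mk [("A", va), ("B", vb), ("C", vc)]

theorem pvMkD_ofList : PySem.Dict.ofList [("A", (1:Int)), ("B", 1), ("C", 1)] = pvMkD 1 1 1 := by decide

theorem pvBumpOne_A (va vb vc s : Int) :
    pvBumpOne (pvMkD va vb vc) ("A", s) = pvMkD (if s > va then s else va) vb vc := by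
  by_cases h : s > va <;> simp [pvBumpOne, pvMkD, PySem.Dict.getD,
    PySem.Dict.get?, PySem.Dict.insert, PySem.Dict.contains, h]

theorem pvBumpOne_B (va vb vc s : Int) :
    pvBumpOne (pvMkD va vb vc) ("B", s) = pvMkD va (if s > vb then s else vb) vc := by
  by_cases h : s > vb <;> simp [pvBumpOne, pvMkD, PySem.Dict.getD,
    PySem.Dict.get?, PySem.Dict.insert, PySem.Dict.contains, h]

theorem pvBumpOne_C (va vb vc s : Int) :
    pvBumpOne (pvMkD va vb vc) ("C", s) = pvMkD va vb (if s > vc then s else vc) := by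
  by_cases h : s > vc <;> simp [pvBumpOne, pvMkD, PySem.Dict.getD,
    PySem.Dict.get?, PySem.Dict.insert, PySem.Dict.contains, h]

theorem pvIte_mkD (c : Bool) (a b d a' b' d' : Int) :
    (if c = true then pvMkD a b d else pvMkD a' b' d') =
      pvMkD (if c = true then a else a') (if c = true then b else b') (if c = true then d else d') := by
  cases c <;> simp

-- one gated max-update; kept opaque to simp so the fold state stays linear in size
def pvUpd (c : Bool) (s v : Int) : Int := if c then (if s > v then s else v) else v

theorem pvRow_A (text kw : String) (s va vb vc : Int) :
    pvBumpKw text (pvMkD va vb vc) (kw, [("A", s)]) =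
      pvMkD (pvUpd (PySem.Str.isIn kw text) s va) vb vc := by
  unfold pvBumpKw pvUpd
  cases h : PySem.Str.isIn kw text <;> simp [pvBumpOne_A]

theorem pvRow_B (text kw : String) (s va vb vc : Int) :
    pvBumpKw text (pvMkD va vb vc) (kw, [("B", s)]) =
      pvMkD va (pvUpd (PySem.Str.isIn kw text) s vb) vc := by
  unfold pvBumpKw pvUpd
  cases h : PySem.Str.isIn kw text <;> simp [pvBumpOne_B]

theorem pvRow_C (text kw : String) (s va vb vc : Int) :
    pvBumpKw text (pvMkD va vb vc) (kw, [("C", s)]) =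
      pvMkD va vb (pvUpd (PySem.Str.isIn kw text) s vc) := by
  unfold pvBumpKw pvUpd
  cases h : PySem.Str.isIn kw text <;> simp [pvBumpOne_C]

theorem pvRow_AC (text kw : String) (s t va vb vc : Int) :
    pvBumpKw text (pvMkD va vb vc) (kw, [("A", s), ("C", t)]) =
      pvMkD (pvUpd (PySem.Str.isIn kw text) s va) vb (pvUpd (PySem.Str.isIn kw text) t vc) := by
  unfold pvBumpKw pvUpd
  cases h : PySem.Str.isIn kw text <;> simp [pvBumpOne_A, pvBumpOne_C]

theorem pvRow_BC (text kw : String) (s t va vb vc : Int) :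
    pvBumpKw text (pvMkD va vb vc) (kw, [("B", s), ("C", t)]) =
      pvMkD va (pvUpd (PySem.Str.isIn kw text) s vb) (pvUpd (PySem.Str.isIn kw text) t vc) := by
  unfold pvBumpKw pvUpd
  cases h : PySem.Str.isIn kw text <;> simp [pvBumpOne_B, pvBumpOne_C]


theorem pvInsert_A (va vb vc s : Int) :
    (pvMkD va vb vc).insert "A" s = pvMkD s vb vc := by
  simp [pvMkD, PySem.Dict.insert, PySem.Dict.contains]

theorem pvInsert_B (va vb vc s : Int) :
    (pvMkD va vb vc).insert "B" s = pvMkD va s vc := by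
  simp [pvMkD, PySem.Dict.insert, PySem.Dict.contains]

theorem pvInsert_C (va vb vc s : Int) :
    (pvMkD va vb vc).insert "C" s = pvMkD va vb s := by
  simp [pvMkD, PySem.Dict.insert, PySem.Dict.contains]

theorem pvGetD_A (va vb vc : Int) : (pvMkD va vb vc).getD "A" 0 = va := by
  simp [pvMkD, PySem.Dict.getD, PySem.Dict.get?]

theorem pvGetD_B (va vb vc : Int) : (pvMkD va vb vc).getD "B" 0 = vb := by
  simp [pvMkD, PySem.Dict.getD, PySem.Dict.get?]

theorem pvGetD_C (va vb vc : Int) : (pvMkD va vb vc).getD "C" 0 = vc := by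
  simp [pvMkD, PySem.Dict.getD, PySem.Dict.get?]

theorem pvKeys_mkD (va vb vc : Int) : (pvMkD va vb vc).keys = ["A", "B", "C"] := by
  simp [pvMkD, PySem.Dict.keys]

theorem pvItems_mkD (va vb vc : Int) :
    (pvMkD va vb vc).items = [("A", va), ("B", vb), ("C", vc)] := rfl

-- ===== VERDICT (by name: the statement is the Claim_ definition above) =====
set_option maxHeartbeats 4000000 in
theorem heuristic_scoring_spec : Claim_equal_heuristic_scoring := by
  intro text _
  unfold Spec_heuristic_scoring heuristic_scoring heuristic_scoring_alt
  simp only [pvEffects, pvMkD_ofList, List.foldl_cons, List.foldl_nil,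
    pvRow_A, pvRow_B, pvRow_C, pvRow_AC, pvRow_BC, pvIte_mkD, pvInsert_A, pvInsert_B,
    pvInsert_C, pvGetD_A, pvGetD_B, pvGetD_C, pvKeys_mkD, pvItems_mkD, pvAnyKw,
    List.any_cons, List.any_nil, Bool.or_false, ite_self]
  simp only [List.cons.injEq, Prod.mk.injEq, and_true, true_and]
  refine ⟨?_, ?_, ?_⟩
  · generalize PySem.Str.isIn "replace" text = b1
    generalize PySem.Str.isIn "migrate" text = b2
    generalize PySem.Str.isIn "rewrite" text = b3
    generalize PySem.Str.isIn "redo" text = b4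
    generalize PySem.Str.isIn "substitute" text = b5
    generalize PySem.Str.isIn "swap" text = b6
    generalize PySem.Str.isIn "modify" text = b7
    generalize PySem.Str.isIn "update" text = b8
    generalize PySem.Str.isIn "upgrade" text = b9
    generalize PySem.Str.isIn "refactor" text = b10
    generalize PySem.Str.isIn "migration" text = b11
    revert b1 b2 b3 b4 b5 b6 b7 b8 b9 b10 b11
    decide
  · generalize PySem.Str.isIn "architecture" text = b1
    generalize PySem.Str.isIn "core" text = b2
    generalize PySem.Str.isIn "entire" text = b3
    generalize PySem.Str.isIn "all" text = b4
    generalize PySem.Str.isIn "system" text = b5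
    generalize PySem.Str.isIn "platform" text = b6
    generalize PySem.Str.isIn "framework" text = b7
    generalize PySem.Str.isIn "module" text = b8
    generalize PySem.Str.isIn "component" text = b9
    generalize PySem.Str.isIn "service" text = b10
    generalize PySem.Str.isIn "interface" text = b11
    generalize PySem.Str.isIn "feature" text = b12
    generalize PySem.Str.isIn "flow" text = b13
    revert b1 b2 b3 b4 b5 b6 b7 b8 b9 b10 b11 b12 b13
    decide
  · generalize PySem.Str.isIn "replace" text = b1
    generalize PySem.Str.isIn "migrate" text = b2
    generalize PySem.Str.isIn "refactor" text = b3
    generalize PySem.Str.isIn "architecture" text = b4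
    generalize PySem.Str.isIn "switch" text = b5
    generalize PySem.Str.isIn "upgrade" text = b6
    generalize PySem.Str.isIn "rewrite" text = b7
    generalize PySem.Str.isIn "new" text = b8
    generalize PySem.Str.isIn "explore" text = b9
    generalize PySem.Str.isIn "trial" text = b10
    generalize PySem.Str.isIn "introduce" text = b11
    generalize PySem.Str.isIn "integrate" text = b12
    revert b1 b2 b3 b4 b5 b6 b7 b8 b9 b10 b11 b12
    decide
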